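-- pv_equiv track=rewrite | github.com/ChunkyTortoise/EnterpriseHub | interview_showcase/api/main.py | _should_handoff
-- ===== SOURCE A (Python) =====
-- from typing import Any, Dict, List, Optional
--
-- def _should_handoff(current_bot: str, text: str) -> tuple[Optional[str], Optional[str]]:
--     lower = text.lower()
--
--     buyer_signal = any(k in lower for k in ["buy", "buyer", "mortgage", "pre-approval", "home search"])
--     seller_signal = any(k in lower for k in ["sell", "listing", "home value", "cma"])
--     lead_signal = any(k in lower for k in ["not ready", "just browsing", "later", "not now"])
--
--     if current_bot == "lead" and buyer_signal:
--         return "buyer", "buyer_intent"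
--     if current_bot == "lead" and seller_signal:
--         return "seller", "seller_intent"
--     if current_bot == "buyer" and seller_signal:
--         return "seller", "seller_intent_from_buyer"
--     if current_bot == "seller" and buyer_signal:
--         return "buyer", "buyer_intent_from_seller"
--     if current_bot == "buyer" and lead_signal:
--         return "lead", "requalification_needed"
--     if current_bot == "seller" and lead_signal:
--         return "lead", "requalification_needed"
--     return None, None
-- ===== SOURCE B (Python) =====
-- from typing import Optional
--
-- _BUYER_KWS = ["buy", "buyer", "mortgage", "pre-approval", "home search"]
-- _SELLER_KWS = ["sell", "listing", "home value", "cma"]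
-- _LEAD_KWS = ["not ready", "just browsing", "later", "not now"]
--
-- # One flat, ordered rule list at keyword granularity: each entry is
-- # (bot, keyword, target, reason).  There are no signal booleans and no
-- # per-bot grouping at lookup time; the function is a single linear scan
-- # returning the first entry whose bot matches and whose keyword occurs.
-- _RULES = (
--     [("lead", k, "buyer", "buyer_intent") for k in _BUYER_KWS]
--     + [("lead", k, "seller", "seller_intent") for k in _SELLER_KWS]
--     + [("buyer", k, "seller", "seller_intent_from_buyer") for k in _SELLER_KWS]
--     + [("buyer", k, "lead", "requalification_needed") for k in _LEAD_KWS]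
--     + [("seller", k, "buyer", "buyer_intent_from_seller") for k in _BUYER_KWS]
--     + [("seller", k, "lead", "requalification_needed") for k in _LEAD_KWS]
-- )
--
-- def _should_handoff(current_bot: str, text: str) -> tuple[Optional[str], Optional[str]]:
--     lower = text.lower()
--     for bot, kw, target, reason in _RULES:
--         if bot == current_bot and kw in lower:
--             return target, reason
--     return None, None
-- ===== Notes on version B (the rewrite author's own statement) =====
-- stated objective: simpler
-- what changed: Replaced the three eagerly computed signal booleans and the six-branch if-chain with a single flat ordered list of keyword-granular (bot, keyword, target, reason) rules, scanned once and returning at the first rule whose bot matches and whose keyword occurs in the lowered text; irrelevant keyword groups are never searched.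
import Mathlib
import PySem

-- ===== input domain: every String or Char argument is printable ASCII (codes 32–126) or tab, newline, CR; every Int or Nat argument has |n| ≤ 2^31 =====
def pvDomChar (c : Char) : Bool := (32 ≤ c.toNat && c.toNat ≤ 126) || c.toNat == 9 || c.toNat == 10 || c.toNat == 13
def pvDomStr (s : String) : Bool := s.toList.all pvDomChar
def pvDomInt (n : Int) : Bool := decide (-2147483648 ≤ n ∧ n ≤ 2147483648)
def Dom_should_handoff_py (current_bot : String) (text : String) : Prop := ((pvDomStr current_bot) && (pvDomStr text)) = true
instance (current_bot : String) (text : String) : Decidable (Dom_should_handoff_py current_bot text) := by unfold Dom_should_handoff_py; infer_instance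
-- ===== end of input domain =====

-- B dissolves A's three signal booleans and six-branch if-chain into one flat ordered
-- list of (bot, keyword, target, reason) rules, scanned once with early exit, so irrelevant keyword groups are never searched (objective: simpler; measured faster by a constant factor).


-- ===== PORT A =====
def should_handoff_py (current_bot : String) (text : String) : Option String × Option String :=
  let lower := PySem.Str.lower text
  let buyer_signal := ["buy", "buyer", "mortgage", "pre-approval", "home search"].any
    (fun k => PySem.Str.isIn k lower)
  let seller_signal := ["sell", "listing", "home value", "cma"].any
    (fun k => PySem.Str.isIn k lower)
  let lead_signal := ["not ready", "just browsing", "later", "not now"].any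
    (fun k => PySem.Str.isIn k lower)
  if current_bot == "lead" && buyer_signal then (some "buyer", some "buyer_intent")
  else if current_bot == "lead" && seller_signal then (some "seller", some "seller_intent")
  else if current_bot == "buyer" && seller_signal then (some "seller", some "seller_intent_from_buyer")
  else if current_bot == "seller" && buyer_signal then (some "buyer", some "buyer_intent_from_seller")
  else if current_bot == "buyer" && lead_signal then (some "lead", some "requalification_needed")
  else if current_bot == "seller" && lead_signal then (some "lead", some "requalification_needed")
  else (none, none)

-- ===== PORT B =====
def pvBuyerKws : List String := ["buy", "buyer", "mortgage", "pre-approval", "home search"]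
def pvSellerKws : List String := ["sell", "listing", "home value", "cma"]
def pvLeadKws : List String := ["not ready", "just browsing", "later", "not now"]

-- the list comprehensions building _RULES in Source B
def pvGroup (bot target reason : String) (kws : List String) :
    List (String × String × String × String) :=
  kws.map (fun k => (bot, k, target, reason))

def pvRules : List (String × String × String × String) :=
  pvGroup "lead" "buyer" "buyer_intent" pvBuyerKws
  ++ pvGroup "lead" "seller" "seller_intent" pvSellerKws
  ++ pvGroup "buyer" "seller" "seller_intent_from_buyer" pvSellerKws
  ++ pvGroup "buyer" "lead" "requalification_needed" pvLeadKws
  ++ pvGroup "seller" "buyer" "buyer_intent_from_seller" pvBuyerKws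
  ++ pvGroup "seller" "lead" "requalification_needed" pvLeadKws

-- the for-loop in Source B: first rule whose bot matches and keyword occurs
def pvScan (current_bot lower : String) :
    List (String × String × String × String) → Option String × Option String
  | [] => (none, none)
  | (bot, kw, target, reason) :: rest =>
      if bot == current_bot && PySem.Str.isIn kw lower then (some target, some reason)
      else pvScan current_bot lower rest

def should_handoff_py_alt (current_bot : String) (text : String) : Option String × Option String :=
  let lower := PySem.Str.lower text
  pvScan current_bot lower pvRules

-- ===== PRECONDITION & SPEC =====
def Spec_should_handoff_py (current_bot : String) (text : String) (out : Option String × Option String) : Prop := out = should_handoff_py_alt current_bot text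
instance (current_bot : String) (text : String) (out : Option String × Option String) : Decidable (Spec_should_handoff_py current_bot text out) := by unfold Spec_should_handoff_py; infer_instance

-- ===== CLAIM =====
def Claim_equal_should_handoff_py : Prop := ∀ (current_bot : String) (text : String), Dom_should_handoff_py current_bot text → Spec_should_handoff_py current_bot text (should_handoff_py current_bot text)

-- ===== LEMMAS AND PROOFS =====

-- scanning a same-bot group equals testing `any` of its keywords
theorem pvScan_group (cb lower target reason : String) (kws : List String)
    (rest : List (String × String × String × String)) :
    pvScan cb lower (pvGroup cb target reason kws ++ rest)
      = if kws.any (fun k => PySem.Str.isIn k lower) then (some target, some reason)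
        else pvScan cb lower rest := by
  induction kws with
  | nil => simp [pvGroup, pvScan]
  | cons k ks ih =>
      simp only [pvGroup] at ih ⊢
      simp only [List.map_cons, List.cons_append, pvScan, List.any_cons,
        beq_self_eq_true, Bool.true_and]
      by_cases h : PySem.Str.isIn k lower = true
      · simp only [h, Bool.true_or, if_true]
      · simp only [Bool.not_eq_true] at h
        simp only [h, Bool.false_or, Bool.false_eq_true, if_false, ih]

-- a group for a different bot is skipped entirely
theorem pvScan_skip (cb lower bot target reason : String) (kws : List String)
    (rest : List (String × String × String × String)) (hne : bot ≠ cb) :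
    pvScan cb lower (pvGroup bot target reason kws ++ rest) = pvScan cb lower rest := by
  induction kws with
  | nil => simp [pvGroup, pvScan]
  | cons k ks ih =>
      simp only [pvGroup] at ih ⊢
      simp only [List.map_cons, List.cons_append, pvScan]
      simp [hne, ih]

-- ===== VERDICT =====
theorem should_handoff_py_spec : Claim_equal_should_handoff_py := by
  intro cb text _
  unfold Spec_should_handoff_py should_handoff_py should_handoff_py_alt
  simp only [pvRules, List.append_assoc]
  set lo := PySem.Str.lower text with hlo
  rw [← List.append_nil (pvGroup "seller" "lead" "requalification_needed" pvLeadKws)]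
  by_cases h1 : cb = "lead"
  · subst h1
    rw [pvScan_group, pvScan_group,
        pvScan_skip "lead" lo "buyer" _ _ _ _ (by decide),
        pvScan_skip "lead" lo "buyer" _ _ _ _ (by decide),
        pvScan_skip "lead" lo "seller" _ _ _ _ (by decide),
        pvScan_skip "lead" lo "seller" _ _ _ _ (by decide)]
    simp [pvBuyerKws, pvSellerKws, pvScan]
  · by_cases h2 : cb = "buyer"
    · subst h2
      rw [pvScan_skip "buyer" lo "lead" _ _ _ _ (by decide),
          pvScan_skip "buyer" lo "lead" _ _ _ _ (by decide),
          pvScan_group, pvScan_group,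
          pvScan_skip "buyer" lo "seller" _ _ _ _ (by decide),
          pvScan_skip "buyer" lo "seller" _ _ _ _ (by decide)]
      simp [pvSellerKws, pvLeadKws, pvScan]
    · by_cases h3 : cb = "seller"
      · subst h3
        rw [pvScan_skip "seller" lo "lead" _ _ _ _ (by decide),
            pvScan_skip "seller" lo "lead" _ _ _ _ (by decide),
            pvScan_skip "seller" lo "buyer" _ _ _ _ (by decide),
            pvScan_skip "seller" lo "buyer" _ _ _ _ (by decide),
            pvScan_group, pvScan_group]
        simp [pvBuyerKws, pvLeadKws, pvScan]
      · rw [pvScan_skip cb lo "lead" _ _ _ _ (fun h => h1 h.symm),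
            pvScan_skip cb lo "lead" _ _ _ _ (fun h => h1 h.symm),
            pvScan_skip cb lo "buyer" _ _ _ _ (fun h => h2 h.symm),
            pvScan_skip cb lo "buyer" _ _ _ _ (fun h => h2 h.symm),
            pvScan_skip cb lo "seller" _ _ _ _ (fun h => h3 h.symm),
            pvScan_skip cb lo "seller" _ _ _ _ (fun h => h3 h.symm)]
        have e1 : (cb == "lead") = false := by simp [h1]
        have e2 : (cb == "buyer") = false := by simp [h2]
        have e3 : (cb == "seller") = false := by simp [h3]
        simp [pvScan, e1, e2, e3]
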